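-- pv_equiv track=rewrite | github.com/cohenra/DynamicChain | apps/api/services/location_service.py | _calculate_snake_odd_even_sequences
-- ===== SOURCE A (Python) =====
-- def _calculate_snake_odd_even_sequences(
--
--     bay_start: int,
--     bay_end: int,
--     level_start: int,
--     level_end: int,
--     slot_start: int,
--     slot_end: int,
--     start_seq: int
-- ) -> dict:
--     """
--     Calculate pick sequences using Z-picking (snake odd/even) strategy.
--
--     This strategy creates an efficient picking path by:
--     - Going up odd slots/levels in ascending order
--     - Coming down even slots/levels in descending order
--     - Creating a snake pattern that minimizes travel distance
--
--     Args:
--         bay_start, bay_end: Bay range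
--         level_start, level_end: Level range
--         slot_start, slot_end: Slot range
--         start_seq: Starting sequence number
--
--     Returns:
--         Dictionary mapping (bay, level, slot) tuples to pick sequence numbers
--     """
--     sequences = {}
--     current_seq = start_seq
--
--     for bay_num in range(bay_start, bay_end + 1):
--         # Determine if this bay is odd or even
--         bay_is_odd = (bay_num % 2 == 1)
--
--         # For odd bays, go ascending (bottom to top)
--         # For even bays, go descending (top to bottom)
--         level_range = (
--             range(level_start, level_end + 1) if bay_is_odd
--             else range(level_end, level_start - 1, -1)
--         )
--
--         for level_num in level_range:
--             # Determine if this level is odd or even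
--             level_is_odd = (level_num % 2 == 1)
--
--             # For odd levels, go ascending (left to right)
--             # For even levels, go descending (right to left)
--             slot_range = (
--                 range(slot_start, slot_end + 1) if level_is_odd
--                 else range(slot_end, slot_start - 1, -1)
--             )
--
--             for slot_num in slot_range:
--                 sequences[(bay_num, level_num, slot_num)] = current_seq
--                 current_seq += 1
--
--     return sequences
-- ===== SOURCE B (Python) =====
-- def _calculate_snake_odd_even_sequences(
--     bay_start: int,
--     bay_end: int,
--     level_start: int,
--     level_end: int,
--     slot_start: int,
--     slot_end: int,
--     start_seq: int
-- ) -> dict: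
--     # Single flat loop: invert the linear pick index t into (bay, level, slot)
--     # with divmod and a closed-form snake formula; no nested loops, no counter.
--     nbays = bay_end - bay_start + 1
--     nlevels = level_end - level_start + 1
--     nslots = slot_end - slot_start + 1
--     if nbays <= 0 or nlevels <= 0 or nslots <= 0:
--         return {}
--     block = nlevels * nslots
--     sequences = {}
--     for t in range(nbays * block):
--         i, r = divmod(t, block)
--         p, q = divmod(r, nslots)
--         bay = bay_start + i
--         level = level_start + p if bay % 2 == 1 else level_end - p
--         slot = slot_start + q if level % 2 == 1 else slot_end - q
--         sequences[(bay, level, slot)] = start_seq + t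
--     return sequences
-- ===== Notes on version B (the rewrite author's own statement) =====
-- stated objective: alternative
-- what changed: Replaces the three nested snake loops with a running sequence counter by a single flat loop over the linear pick index t, inverting t into (bay, level, slot) with divmod and closed-form odd/even formulas and assigning seq = start_seq + t directly.
import Mathlib
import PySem

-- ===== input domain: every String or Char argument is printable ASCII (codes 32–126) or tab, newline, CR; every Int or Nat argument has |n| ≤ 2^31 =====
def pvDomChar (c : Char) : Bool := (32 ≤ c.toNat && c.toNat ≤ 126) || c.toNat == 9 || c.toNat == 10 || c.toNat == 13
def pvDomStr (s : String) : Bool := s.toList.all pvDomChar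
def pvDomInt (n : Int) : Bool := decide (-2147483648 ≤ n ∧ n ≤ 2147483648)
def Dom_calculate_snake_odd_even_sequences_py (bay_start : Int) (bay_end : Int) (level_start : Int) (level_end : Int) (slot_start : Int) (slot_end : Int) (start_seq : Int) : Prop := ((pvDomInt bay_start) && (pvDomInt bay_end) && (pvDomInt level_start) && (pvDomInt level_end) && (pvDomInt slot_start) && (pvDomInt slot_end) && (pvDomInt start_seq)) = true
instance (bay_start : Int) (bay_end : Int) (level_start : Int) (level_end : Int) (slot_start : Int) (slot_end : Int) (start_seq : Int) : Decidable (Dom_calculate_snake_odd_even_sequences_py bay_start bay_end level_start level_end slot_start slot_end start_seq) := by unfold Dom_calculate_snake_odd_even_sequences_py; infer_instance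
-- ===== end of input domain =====

-- ===== PORT A =====
-- Snake-pattern pick-sequence assignment.  B replaces A's three nested loops +
-- running counter by one flat loop over the linear index with divmod inversion
-- (objective: alternative decomposition, same cost).
def calculate_snake_odd_even_sequences_py (bay_start : Int) (bay_end : Int) (level_start : Int) (level_end : Int) (slot_start : Int) (slot_end : Int) (start_seq : Int) : List (Int × Int × Int × Int) :=
  let st := (PySem.List.pyRange bay_start (bay_end + 1) 1).foldl
    (fun (st : PySem.Dict (Int × Int × Int) Int × Int) bay_num =>
      let bay_is_odd := PySem.Int.mod bay_num 2 == 1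
      let level_range := if bay_is_odd then PySem.List.pyRange level_start (level_end + 1) 1
                         else PySem.List.pyRange level_end (level_start - 1) (-1)
      level_range.foldl (fun st level_num =>
        let level_is_odd := PySem.Int.mod level_num 2 == 1
        let slot_range := if level_is_odd then PySem.List.pyRange slot_start (slot_end + 1) 1
                          else PySem.List.pyRange slot_end (slot_start - 1) (-1)
        slot_range.foldl (fun st slot_num =>
          (st.1.insert (bay_num, level_num, slot_num) st.2, st.2 + 1)) st) st)
    (PySem.Dict.empty, start_seq)
  st.1.items.map (fun p => (p.1.1, p.1.2.1, p.1.2.2, p.2))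

-- ===== PORT B =====
def calculate_snake_odd_even_sequences_py_alt (bay_start : Int) (bay_end : Int) (level_start : Int) (level_end : Int) (slot_start : Int) (slot_end : Int) (start_seq : Int) : List (Int × Int × Int × Int) :=
  let nbays := bay_end - bay_start + 1
  let nlevels := level_end - level_start + 1
  let nslots := slot_end - slot_start + 1
  if nbays ≤ 0 || nlevels ≤ 0 || nslots ≤ 0 then []
  else
    let block := nlevels * nslots
    let sequences := (PySem.List.pyRange 0 (nbays * block) 1).foldl
      (fun (d : PySem.Dict (Int × Int × Int) Int) t =>
        let i := PySem.Int.floordiv t block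
        let r := PySem.Int.mod t block
        let p := PySem.Int.floordiv r nslots
        let q := PySem.Int.mod r nslots
        let bay := bay_start + i
        let level := if PySem.Int.mod bay 2 == 1 then level_start + p else level_end - p
        let slot := if PySem.Int.mod level 2 == 1 then slot_start + q else slot_end - q
        d.insert (bay, level, slot) (start_seq + t)) PySem.Dict.empty
    sequences.items.map (fun p => (p.1.1, p.1.2.1, p.1.2.2, p.2))

-- ===== PRECONDITION & SPEC =====
def Spec_calculate_snake_odd_even_sequences_py (bay_start : Int) (bay_end : Int) (level_start : Int) (level_end : Int) (slot_start : Int) (slot_end : Int) (start_seq : Int) (out : List (Int × Int × Int × Int)) : Prop := out = calculate_snake_odd_even_sequences_py_alt bay_start bay_end level_start level_end slot_start slot_end start_seq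
instance (bay_start : Int) (bay_end : Int) (level_start : Int) (level_end : Int) (slot_start : Int) (slot_end : Int) (start_seq : Int) (out : List (Int × Int × Int × Int)) : Decidable (Spec_calculate_snake_odd_even_sequences_py bay_start bay_end level_start level_end slot_start slot_end start_seq out) := by unfold Spec_calculate_snake_odd_even_sequences_py; infer_instance

-- ===== CLAIM (what is proved, stated in full; the proofs are below) =====
def Claim_equal_calculate_snake_odd_even_sequences_py : Prop := ∀ (bay_start : Int) (bay_end : Int) (level_start : Int) (level_end : Int) (slot_start : Int) (slot_end : Int) (start_seq : Int), Dom_calculate_snake_odd_even_sequences_py bay_start bay_end level_start level_end slot_start slot_end start_seq → Spec_calculate_snake_odd_even_sequences_py bay_start bay_end level_start level_end slot_start slot_end start_seq (calculate_snake_odd_even_sequences_py bay_start bay_end level_start level_end slot_start slot_end start_seq)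

-- ===== LEMMAS AND PROOFS =====

-- the closed-form cell of linear index n (Nat-arithmetic mirror of B's divmod inversion)
def pvCell (bs ls le ss se : Int) (NL NS : Nat) (n : Nat) : Int × Int × Int :=
  let bay := bs + ((n / (NL * NS) : Nat) : Int)
  let p : Nat := n % (NL * NS) / NS
  let q : Nat := n % (NL * NS) % NS
  let level := if PySem.Int.mod bay 2 == 1 then ls + (p : Int) else le - (p : Int)
  let slot := if PySem.Int.mod level 2 == 1 then ss + (q : Int) else se - (q : Int)
  (bay, level, slot)

lemma pvRangeMul {α : Type} (m n : Nat) (f : Nat → α) :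
    (List.range (m * n)).map f
      = (List.range m).flatMap (fun i => (List.range n).map fun j => f (n * i + j)) := by
  induction m with
  | zero => simp
  | succ m ih =>
    have h1 : (m + 1) * n = m * n + n := by ring
    rw [h1, List.range_add, List.map_append, ih, List.range_succ, List.flatMap_append,
        List.flatMap_singleton, List.map_map]
    congr 1
    apply List.map_congr_left
    intro j _
    simp only [Function.comp_apply]
    congr 1
    ring

lemma pvCellInj (bs ls le ss se : Int) (NL NS : Nat)
    (m n : Nat) (h : pvCell bs ls le ss se NL NS m = pvCell bs ls le ss se NL NS n) :
    m = n := by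
  simp only [pvCell, Prod.mk.injEq] at h
  obtain ⟨h1, h2, h3⟩ := h
  have hi : m / (NL * NS) = n / (NL * NS) := by omega
  rw [hi] at h2 h3
  have hp : m % (NL * NS) / NS = n % (NL * NS) / NS := by
    split_ifs at h2 <;> omega
  rw [hp] at h3
  have hq : m % (NL * NS) % NS = n % (NL * NS) % NS := by
    split_ifs at h3 <;> omega
  have e1 := Nat.div_add_mod m (NL * NS)
  have e2 := Nat.div_add_mod (m % (NL * NS)) NS
  have e3 := Nat.div_add_mod n (NL * NS)
  have e4 := Nat.div_add_mod (n % (NL * NS)) NS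
  have hmod : m % (NL * NS) = n % (NL * NS) := by rw [← e2, hp, hq, e4]
  rw [← e1, hi, hmod, e3]

-- a fold inserting distinct fresh keys with a running counter appends them in order
lemma pvFoldInsert (T : Nat) (f : Nat → Int × Int × Int) (s : Int)
    (hinj : ∀ m n, m < T → n < T → f m = f n → m = n) :
    ((List.range T).map f).foldl
        (fun (st : PySem.Dict (Int × Int × Int) Int × Int) k => (st.1.insert k st.2, st.2 + 1))
        (PySem.Dict.empty, s)
      = (PySem.Dict.mk ((List.range T).map fun n => (f n, s + (n : Int))), s + (T : Int)) := by
  induction T with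
  | zero => simp [PySem.Dict.empty]
  | succ T ih =>
    have hinj' : ∀ m n, m < T → n < T → f m = f n → m = n :=
      fun m n hm hn => hinj m n (by omega) (by omega)
    rw [List.range_succ, List.map_append, List.foldl_append, ih hinj']
    have hfresh : (PySem.Dict.mk ((List.range T).map fun n => (f n, s + (n : Int)))).contains (f T) = false := by
      rw [PySem.Dict.contains_mk, List.any_eq_false]
      intro p hp
      obtain ⟨n, hn, rfl⟩ := List.mem_map.mp hp
      rw [List.mem_range] at hn
      intro hfe
      exact absurd (hinj n T (by omega) (by omega) (eq_of_beq hfe)) (by omega)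
    simp only [List.map_cons, List.map_nil, List.foldl_cons, List.foldl_nil]
    refine Prod.ext ?_ ?_
    · apply PySem.Dict.ext
      rw [PySem.Dict.items_insert_of_not_contains _ _ hfresh]
      simp [List.map_append]
    · push_cast; ring

-- splitting range (NB*(NL*NS)) by divmod gives the nested-range structure
lemma pvSnakeList {α : Type} (NB NL NS : Nat) (g : Nat → Nat → Nat → α) :
    (List.range (NB * (NL * NS))).map
        (fun n => g (n / (NL * NS)) (n % (NL * NS) / NS) (n % (NL * NS) % NS))
      = (List.range NB).flatMap fun i =>
          (List.range NL).flatMap fun p =>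
            (List.range NS).map fun q => g i p q := by
  rw [pvRangeMul NB (NL * NS)]
  refine congrArg (fun f => List.flatMap f (List.range NB)) (funext fun i => ?_)
  have step1 : (List.range (NL * NS)).map (fun j => g ((NL * NS * i + j) / (NL * NS))
        ((NL * NS * i + j) % (NL * NS) / NS) ((NL * NS * i + j) % (NL * NS) % NS))
      = (List.range (NL * NS)).map (fun j => g i (j / NS) (j % NS)) := by
    apply List.map_congr_left
    intro j hj
    rw [List.mem_range] at hj
    have h0 : 0 < NL * NS := by omega
    have e1 : (NL * NS * i + j) / (NL * NS) = i := by
      rw [Nat.mul_add_div h0, Nat.div_eq_of_lt hj]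
      omega
    have e2 : (NL * NS * i + j) % (NL * NS) = j := by
      rw [Nat.mul_add_mod, Nat.mod_eq_of_lt hj]
    rw [e1, e2]
  rw [step1, pvRangeMul NL NS]
  refine congrArg (fun f => List.flatMap f (List.range NL)) (funext fun p => ?_)
  apply List.map_congr_left
  intro q hq
  rw [List.mem_range] at hq
  have h0 : 0 < NS := by omega
  have e1 : (NS * p + q) / NS = p := by
    rw [Nat.mul_add_div h0, Nat.div_eq_of_lt hq]
    omega
  have e2 : (NS * p + q) % NS = q := by
    rw [Nat.mul_add_mod, Nat.mod_eq_of_lt hq]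
  rw [e1, e2]


lemma pvLevelRange_eq (ls le bay : Int) :
    (if PySem.Int.mod bay 2 == 1 then PySem.List.pyRange ls (le + 1) 1
     else PySem.List.pyRange le (ls - 1) (-1))
      = (List.range (le + 1 - ls).toNat).map
          (fun (p : Nat) => if PySem.Int.mod bay 2 == 1 then ls + (p : Int) else le - (p : Int)) := by
  by_cases h : PySem.Int.mod bay 2 == 1
  · rw [if_pos h, PySem.List.pyRange_one]
    exact List.map_congr_left fun p _ => (if_pos h).symm
  · have ht : (le - (ls - 1)).toNat = (le + 1 - ls).toNat := by omega
    rw [if_neg h, PySem.List.pyRange_neg_one, ht]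
    exact List.map_congr_left fun p _ => (if_neg h).symm

lemma pvSlotRange_eq (ss se lvl : Int) :
    (if PySem.Int.mod lvl 2 == 1 then PySem.List.pyRange ss (se + 1) 1
     else PySem.List.pyRange se (ss - 1) (-1))
      = (List.range (se + 1 - ss).toNat).map
          (fun (q : Nat) => if PySem.Int.mod lvl 2 == 1 then ss + (q : Int) else se - (q : Int)) := by
  by_cases h : PySem.Int.mod lvl 2 == 1
  · rw [if_pos h, PySem.List.pyRange_one]
    exact List.map_congr_left fun q _ => (if_pos h).symm
  · have ht : (se - (ss - 1)).toNat = (se + 1 - ss).toNat := by omega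
    rw [if_neg h, PySem.List.pyRange_neg_one, ht]
    exact List.map_congr_left fun q _ => (if_neg h).symm

lemma pvA_eq (bs be ls le ss se s : Int) :
    calculate_snake_odd_even_sequences_py bs be ls le ss se s
      = (List.range ((be + 1 - bs).toNat * ((le + 1 - ls).toNat * (se + 1 - ss).toNat))).map
          (fun n =>
            ((pvCell bs ls le ss se (le + 1 - ls).toNat (se + 1 - ss).toNat n).1,
             (pvCell bs ls le ss se (le + 1 - ls).toNat (se + 1 - ss).toNat n).2.1,
             (pvCell bs ls le ss se (le + 1 - ls).toNat (se + 1 - ss).toNat n).2.2,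
             s + (n : Int))) := by
  have hkey := pvSnakeList (be + 1 - bs).toNat (le + 1 - ls).toNat (se + 1 - ss).toNat
    (fun i p q =>
      ((bs + (i : Int)),
       (if PySem.Int.mod (bs + (i : Int)) 2 == 1 then ls + (p : Int) else le - (p : Int)),
       (if PySem.Int.mod (if PySem.Int.mod (bs + (i : Int)) 2 == 1 then ls + (p : Int)
            else le - (p : Int)) 2 == 1 then ss + (q : Int) else se - (q : Int))))
  have hfold := pvFoldInsert ((be + 1 - bs).toNat * ((le + 1 - ls).toNat * (se + 1 - ss).toNat))
    (fun n =>
      (bs + ((n / ((le + 1 - ls).toNat * (se + 1 - ss).toNat) : Nat) : Int),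
       if PySem.Int.mod (bs + ((n / ((le + 1 - ls).toNat * (se + 1 - ss).toNat) : Nat) : Int)) 2 == 1 then
         ls + ((n % ((le + 1 - ls).toNat * (se + 1 - ss).toNat) / (se + 1 - ss).toNat : Nat) : Int)
       else le - ((n % ((le + 1 - ls).toNat * (se + 1 - ss).toNat) / (se + 1 - ss).toNat : Nat) : Int),
       if PySem.Int.mod (if PySem.Int.mod (bs + ((n / ((le + 1 - ls).toNat * (se + 1 - ss).toNat) : Nat) : Int)) 2 == 1 then
             ls + ((n % ((le + 1 - ls).toNat * (se + 1 - ss).toNat) / (se + 1 - ss).toNat : Nat) : Int)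
           else le - ((n % ((le + 1 - ls).toNat * (se + 1 - ss).toNat) / (se + 1 - ss).toNat : Nat) : Int)) 2 == 1 then
         ss + ((n % ((le + 1 - ls).toNat * (se + 1 - ss).toNat) % (se + 1 - ss).toNat : Nat) : Int)
       else se - ((n % ((le + 1 - ls).toNat * (se + 1 - ss).toNat) % (se + 1 - ss).toNat : Nat) : Int)))
    s (fun m n _ _ h => pvCellInj bs ls le ss se _ _ m n h)
  rw [hkey] at hfold
  simp only [List.foldl_flatMap, List.foldl_map] at hfold
  simp only [calculate_snake_odd_even_sequences_py]
  simp only [pvSlotRange_eq ss se]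
  simp only [pvLevelRange_eq ls le]
  simp only [PySem.List.pyRange_one, List.foldl_map]
  rw [hfold]
  simp [pvCell, List.map_map]

lemma pvB_eq (bs be ls le ss se s : Int) :
    calculate_snake_odd_even_sequences_py_alt bs be ls le ss se s
      = (List.range ((be + 1 - bs).toNat * ((le + 1 - ls).toNat * (se + 1 - ss).toNat))).map
          (fun n =>
            ((pvCell bs ls le ss se (le + 1 - ls).toNat (se + 1 - ss).toNat n).1,
             (pvCell bs ls le ss se (le + 1 - ls).toNat (se + 1 - ss).toNat n).2.1,
             (pvCell bs ls le ss se (le + 1 - ls).toNat (se + 1 - ss).toNat n).2.2,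
             s + (n : Int))) := by
  simp only [calculate_snake_odd_even_sequences_py_alt]
  by_cases hg : be - bs + 1 ≤ 0 ∨ le - ls + 1 ≤ 0 ∨ se - ss + 1 ≤ 0
  · rw [if_pos (by simp only [Bool.or_eq_true, decide_eq_true_eq]; omega)]
    have hT : (be + 1 - bs).toNat * ((le + 1 - ls).toNat * (se + 1 - ss).toNat) = 0 := by
      rcases hg with h | h | h
      · have h0 : (be + 1 - bs).toNat = 0 := by omega
        simp [h0]
      · have h0 : (le + 1 - ls).toNat = 0 := by omega
        simp [h0]
      · have h0 : (se + 1 - ss).toNat = 0 := by omega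
        simp [h0]
    rw [hT]
    rfl
  · rw [not_or, not_or] at hg
    obtain ⟨h1, h2, h3⟩ := hg
    rw [if_neg (by simp only [Bool.or_eq_true, decide_eq_true_eq]; omega)]
    have c1 : be - bs + 1 = (((be + 1 - bs).toNat : Nat) : Int) := by omega
    have c2 : le - ls + 1 = (((le + 1 - ls).toNat : Nat) : Int) := by omega
    have c3 : se - ss + 1 = (((se + 1 - ss).toNat : Nat) : Int) := by omega
    rw [c1, c2, c3]
    have hbl : (((le + 1 - ls).toNat : Nat) : Int) * (((se + 1 - ss).toNat : Nat) : Int)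
        = (((le + 1 - ls).toNat * (se + 1 - ss).toNat : Nat) : Int) := by push_cast; ring
    rw [hbl]
    have hT : (((be + 1 - bs).toNat : Nat) : Int) * (((le + 1 - ls).toNat * (se + 1 - ss).toNat : Nat) : Int)
        = (((be + 1 - bs).toNat * ((le + 1 - ls).toNat * (se + 1 - ss).toNat) : Nat) : Int) := by push_cast; ring
    rw [hT, PySem.List.pyRange_one]
    simp only [Int.sub_zero, Int.toNat_natCast, zero_add, List.foldl_map,
      PySem.Int.floordiv_natCast, PySem.Int.mod_natCast]
    have hnodup : ((List.range ((be + 1 - bs).toNat * ((le + 1 - ls).toNat * (se + 1 - ss).toNat))).map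
        (pvCell bs ls le ss se (le + 1 - ls).toNat (se + 1 - ss).toNat)).Nodup :=
      (List.nodup_map_iff_inj_on (List.nodup_range)).mpr
        (fun m _ n _ h => pvCellInj bs ls le ss se _ _ m n h)
    have hitems := PySem.Dict.items_foldl_insert_fresh
      (l := List.range ((be + 1 - bs).toNat * ((le + 1 - ls).toNat * (se + 1 - ss).toNat)))
      (k := pvCell bs ls le ss se (le + 1 - ls).toNat (se + 1 - ss).toNat)
      (v := fun n => s + (n : Int))
      (d := PySem.Dict.empty)
      (by intro a _; simp) hnodup
    simp only [pvCell] at hitems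
    rw [hitems]
    simp [pvCell, List.map_map, Function.comp_def]
    rfl

-- ===== VERDICT (by name: the statement is the Claim_ definition above) =====
theorem calculate_snake_odd_even_sequences_py_spec : Claim_equal_calculate_snake_odd_even_sequences_py := by
  intro bay_start bay_end level_start level_end slot_start slot_end start_seq _
  unfold Spec_calculate_snake_odd_even_sequences_py
  rw [pvA_eq, pvB_eq]
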